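-- pv_equiv track=rewrite | github.com/ProtsenkoAI/nlpcompete | model_level/processors.py | _char_idxs_to_token_idxs
-- ===== SOURCE A (Python) =====
-- def _char_idxs_to_token_idxs(char_idxs, tokenizer_out):
--     start_chars, end_chars = char_idxs
--     tokens_positions = tokenizer_out["offset_mapping"]
--     start_tokens, end_tokens = [], []
--
--     assert(len(start_chars) == len(end_chars) and len(end_chars) == len(tokens_positions))
--     for start_idx, end_idx, text_positions in zip(start_chars, end_chars, tokens_positions):
--         text_token_starts, text_token_ends = zip(*text_positions)
--         if end_idx <= max(text_token_ends):
--             nearest_start = min(text_token_starts, key=lambda x: abs(x - start_idx))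
--             nearest_end = min(text_token_ends, key=lambda x: abs(x - end_idx))
--             token_start = text_token_starts.index(nearest_start)
--             token_end = text_token_ends.index(nearest_end)
--         else:
--             # answer not in context
--             raise ValueError(f"end_idx is wrong: {end_idx, max(text_token_ends)}")
--         start_tokens.append(token_start)
--         end_tokens.append(token_end)
--
--     return start_tokens, end_tokens
-- ===== SOURCE B (Python) =====
-- def _char_idxs_to_token_idxs(char_idxs, tokenizer_out):
--     start_chars, end_chars = char_idxs
--     tokens_positions = tokenizer_out["offset_mapping"]
--     assert(len(start_chars) == len(end_chars) and len(end_chars) == len(tokens_positions))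
--     start_tokens, end_tokens = [], []
--
--     for start_idx, end_idx, text_positions in zip(start_chars, end_chars, tokens_positions):
--         # one fused pass: running max of token ends, and first-minimizer argmins
--         # for |token_start - start_idx| and |token_end - end_idx|
--         max_end = None
--         best_s = best_sd = None
--         best_e = best_ed = None
--         for i, (ts, te) in enumerate(text_positions):
--             if max_end is None or max_end < te:
--                 max_end = te
--             sd = abs(ts - start_idx)
--             if best_sd is None or sd < best_sd:
--                 best_sd, best_s = sd, i
--             ed = abs(te - end_idx)
--             if best_ed is None or ed < best_ed:
--                 best_ed, best_e = ed, i
--         if max_end is None or end_idx > max_end: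
--             # answer not in context
--             raise ValueError(f"end_idx is wrong: {end_idx, max_end}")
--         start_tokens.append(best_s)
--         end_tokens.append(best_e)
--
--     return start_tokens, end_tokens
-- ===== Notes on version B (the rewrite author's own statement) =====
-- stated objective: alternative
-- what changed: Replaces A's five separate scans per example (max over ends, min-by-key over starts, min-by-key over ends, then two .index lookups) with one fused enumerate pass that tracks the running max end and the first-minimizer argmin indices directly.
import Mathlib
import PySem

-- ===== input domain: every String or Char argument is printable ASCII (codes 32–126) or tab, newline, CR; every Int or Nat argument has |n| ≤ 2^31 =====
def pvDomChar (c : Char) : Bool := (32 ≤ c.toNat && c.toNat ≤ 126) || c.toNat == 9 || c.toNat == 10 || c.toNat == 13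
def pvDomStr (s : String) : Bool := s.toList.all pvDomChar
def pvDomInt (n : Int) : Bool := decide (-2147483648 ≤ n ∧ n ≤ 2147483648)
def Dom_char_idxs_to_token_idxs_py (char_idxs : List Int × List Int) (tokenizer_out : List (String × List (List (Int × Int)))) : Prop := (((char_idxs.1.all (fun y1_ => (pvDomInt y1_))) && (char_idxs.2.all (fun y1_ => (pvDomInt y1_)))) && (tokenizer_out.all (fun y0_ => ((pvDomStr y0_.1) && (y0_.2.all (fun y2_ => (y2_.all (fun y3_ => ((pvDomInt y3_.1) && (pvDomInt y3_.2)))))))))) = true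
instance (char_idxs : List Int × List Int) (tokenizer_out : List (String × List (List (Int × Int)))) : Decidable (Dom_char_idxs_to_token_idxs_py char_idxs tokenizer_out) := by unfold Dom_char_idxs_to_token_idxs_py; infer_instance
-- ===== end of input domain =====

-- B replaces A's five scans per example (max, two min-by-key, two .index) with one fused
-- enumerate pass tracking the running max end and both first-minimizer argmin indices (objective: alternative).

-- ===== PORT A =====
-- per-example body of A: zip(*text_positions), max, two min(…, key=abs(…)), two .index
def pvStepA (s e : Int) (tps : List (Int × Int)) : Option (Int × Int) :=
  let starts := tps.map (·.1)
  let ends := tps.map (·.2)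
  match PySem.List.max? ends (fun x => x) with
  | none => none  -- zip(*[]) raises ValueError on an empty offset list (excluded by Pre_)
  | some mx =>
    if e ≤ mx then
      match PySem.List.min? starts (fun x => (x - s).natAbs),
            PySem.List.min? ends (fun x => (x - e).natAbs) with
      | some ns, some ne =>
        match PySem.List.index? starts ns, PySem.List.index? ends ne with
        | some i, some j => some ((i : Int), (j : Int))
        | _, _ => none
      | _, _ => none
    else none  -- raise ValueError (excluded by Pre_)

def pvLoopA : List (Int × Int × List (Int × Int)) → List Int → List Int → List Int × List Int
  | [], ss, es => (ss, es)
  | (s, e, tps) :: rest, ss, es =>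
    match pvStepA s e tps with
    | some (i, j) => pvLoopA rest (ss ++ [i]) (es ++ [j])
    | none => (ss, es)  -- raise path (excluded by Pre_)

def char_idxs_to_token_idxs_py (char_idxs : List Int × List Int) (tokenizer_out : List (String × List (List (Int × Int)))) : List Int × List Int :=
  match PySem.Dict.get? ⟨tokenizer_out⟩ "offset_mapping" with
  | none => ([], [])  -- KeyError (excluded by Pre_)
  | some tp =>
    if char_idxs.1.length = char_idxs.2.length ∧ char_idxs.2.length = tp.length then
      pvLoopA (char_idxs.1.zip (char_idxs.2.zip tp)) [] []
    else ([], [])  -- AssertionError (excluded by Pre_)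

-- ===== PORT B =====
-- fused single pass of Source B: running max end + two (index, distance) first-minimizer trackers
def pvFuse (s e : Int) : List (Int × Int) → Nat → Option Int → Option (Nat × Nat) → Option (Nat × Nat) → Option Int × Option (Nat × Nat) × Option (Nat × Nat)
  | [], _, mx, bs, be => (mx, bs, be)
  | (ts, te) :: rest, i, mx, bs, be =>
    let mx' := match mx with | none => some te | some m => if m < te then some te else some m
    let sd := (ts - s).natAbs
    let bs' := match bs with | none => some (i, sd) | some p => if sd < p.2 then some (i, sd) else some p
    let ed := (te - e).natAbs
    let be' := match be with | none => some (i, ed) | some p => if ed < p.2 then some (i, ed) else some p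
    pvFuse s e rest (i + 1) mx' bs' be'

def pvStepB (s e : Int) (tps : List (Int × Int)) : Option (Int × Int) :=
  match pvFuse s e tps 0 none none none with
  | (some m, some bs, some be) => if e ≤ m then some ((bs.1 : Int), (be.1 : Int)) else none
  | _ => none  -- raise ValueError: max_end is None or end_idx > max_end (excluded by Pre_)

def pvLoopB : List (Int × Int × List (Int × Int)) → List Int → List Int → List Int × List Int
  | [], ss, es => (ss, es)
  | (s, e, tps) :: rest, ss, es =>
    match pvStepB s e tps with
    | some (i, j) => pvLoopB rest (ss ++ [i]) (es ++ [j])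
    | none => (ss, es)  -- raise path (excluded by Pre_)

def char_idxs_to_token_idxs_py_alt (char_idxs : List Int × List Int) (tokenizer_out : List (String × List (List (Int × Int)))) : List Int × List Int :=
  match PySem.Dict.get? ⟨tokenizer_out⟩ "offset_mapping" with
  | none => ([], [])  -- KeyError (excluded by Pre_)
  | some tp =>
    if char_idxs.1.length = char_idxs.2.length ∧ char_idxs.2.length = tp.length then
      pvLoopB (char_idxs.1.zip (char_idxs.2.zip tp)) [] []
    else ([], [])  -- AssertionError (excluded by Pre_)

-- ===== PRECONDITION & SPEC =====
-- Pre_ excludes exactly the inputs where the Python raises: a missing "offset_mapping" key (KeyError),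
-- unequal lengths (AssertionError), an empty per-example offset list (ValueError from zip(*[])),
-- and an end index above every token end (the explicit ValueError).
def Pre_char_idxs_to_token_idxs_py (char_idxs : List Int × List Int) (tokenizer_out : List (String × List (List (Int × Int)))) : Prop :=
  ∃ tp ∈ (PySem.Dict.get? ⟨tokenizer_out⟩ "offset_mapping").toList,
    char_idxs.1.length = char_idxs.2.length ∧ char_idxs.2.length = tp.length ∧
    ∀ p ∈ char_idxs.2.zip tp, p.2 ≠ [] ∧ ∃ q ∈ p.2, p.1 ≤ q.2
instance (char_idxs : List Int × List Int) (tokenizer_out : List (String × List (List (Int × Int)))) : Decidable (Pre_char_idxs_to_token_idxs_py char_idxs tokenizer_out) := by unfold Pre_char_idxs_to_token_idxs_py; infer_instance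

def pvWitness_char_idxs_to_token_idxs_py : (List Int × List Int) × (List (String × List (List (Int × Int)))) :=
  (([0], [1]), [("offset_mapping", [[(0, 1)]])])

def Spec_char_idxs_to_token_idxs_py (char_idxs : List Int × List Int) (tokenizer_out : List (String × List (List (Int × Int)))) (out : List Int × List Int) : Prop := out = char_idxs_to_token_idxs_py_alt char_idxs tokenizer_out
instance (char_idxs : List Int × List Int) (tokenizer_out : List (String × List (List (Int × Int)))) (out : List Int × List Int) : Decidable (Spec_char_idxs_to_token_idxs_py char_idxs tokenizer_out out) := by unfold Spec_char_idxs_to_token_idxs_py; infer_instance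

-- ===== CLAIM (what is proved, stated in full; the proofs are below) =====
def Claim_equal_char_idxs_to_token_idxs_py : Prop := ∀ (char_idxs : List Int × List Int) (tokenizer_out : List (String × List (List (Int × Int)))), Dom_char_idxs_to_token_idxs_py char_idxs tokenizer_out → Pre_char_idxs_to_token_idxs_py char_idxs tokenizer_out → Spec_char_idxs_to_token_idxs_py char_idxs tokenizer_out (char_idxs_to_token_idxs_py char_idxs tokenizer_out)

-- ===== LEMMAS AND PROOFS =====

-- proof-side components of the fused pass: running max, (index, key) tracker, (index, value) tracker
def pvMaxF : List Int → Option Int → Option Int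
  | [], mx => mx
  | x :: t, mx => pvMaxF t (match mx with | none => some x | some m => if m < x then some x else some m)

def pvDF (k : Int → Nat) : List Int → Nat → Option (Nat × Nat) → Option (Nat × Nat)
  | [], _, b => b
  | x :: t, i, b => pvDF k t (i + 1) (match b with | none => some (i, k x) | some p => if k x < p.2 then some (i, k x) else some p)

def pvVF (k : Int → Nat) : List Int → Nat → Option (Nat × Int) → Option (Nat × Int)
  | [], _, b => b
  | x :: t, i, b => pvVF k t (i + 1) (match b with | none => some (i, x) | some p => if k x < k p.2 then some (i, x) else some p)

theorem pvFuse_decomp (s e : Int) : ∀ (tps : List (Int × Int)) (i : Nat) (mx : Option Int) (bs be : Option (Nat × Nat)),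
    pvFuse s e tps i mx bs be =
      (pvMaxF (tps.map (·.2)) mx,
       pvDF (fun x => (x - s).natAbs) (tps.map (·.1)) i bs,
       pvDF (fun x => (x - e).natAbs) (tps.map (·.2)) i be)
  | [], _, _, _, _ => rfl
  | (ts, te) :: rest, i, mx, bs, be => by
    simp only [pvFuse, List.map, pvMaxF, pvDF]
    exact pvFuse_decomp s e rest (i + 1) _ _ _

theorem pvMaxF_eq_foldl : ∀ (t : List Int) (mx : Option Int),
    pvMaxF t mx = t.foldl (fun acc x => match acc with | none => some x | some m => if m < x then some x else some m) mx
  | [], _ => rfl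
  | _ :: t, mx => pvMaxF_eq_foldl t _

theorem pvMax?_eq (ends : List Int) : PySem.List.max? ends (fun x => x) = pvMaxF ends none := by
  rw [pvMaxF_eq_foldl]
  simp only [PySem.List.max?]
  congr 1
  funext acc x
  cases acc <;> rfl

theorem pvDF_eq_vF (k : Int → Nat) : ∀ (t : List Int) (i bi : Nat) (bv : Int),
    pvDF k t i (some (bi, k bv)) = (pvVF k t i (some (bi, bv))).map (fun p => (p.1, k p.2))
  | [], _, _, _ => rfl
  | x :: t, i, bi, bv => by
    simp only [pvDF, pvVF]
    by_cases h : k x < k bv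
    · simp only [h, if_pos]; exact pvDF_eq_vF k t (i + 1) i x
    · simp only [h, if_neg, not_false_iff]; exact pvDF_eq_vF k t (i + 1) bi bv

theorem pvVF_val (k : Int → Nat) : ∀ (t : List Int) (i bi : Nat) (bv : Int),
    (pvVF k t i (some (bi, bv))).map (·.2) =
      t.foldl (fun acc x => match acc with | none => some x | some m => if k x < k m then some x else some m) (some bv)
  | [], _, _, _ => rfl
  | x :: t, i, bi, bv => by
    simp only [pvVF, List.foldl]
    by_cases h : k x < k bv
    · simp only [h, if_pos]; exact pvVF_val k t (i + 1) i x
    · simp only [h, if_neg, not_false_iff]; exact pvVF_val k t (i + 1) bi bv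

theorem pvMin?_cons (k : Int → Nat) (x : Int) (t : List Int) :
    PySem.List.min? (x :: t) k =
      t.foldl (fun acc y => match acc with | none => some y | some m => if k y < k m then some y else some m) (some x) := by
  simp only [PySem.List.min?, List.foldl_cons]
  congr 1
  funext acc y
  cases acc <;> rfl

-- first-minimizer invariant: the fused tracker's index is the .index of the min value
theorem pvVF_idx (k : Int → Nat) : ∀ (t pre : List Int) (bi : Nat) (bv : Int),
    PySem.List.index? pre bv = some bi →
    (∀ y ∈ pre, k bv ≤ k y) →
    ∃ bi' bv', pvVF k t pre.length (some (bi, bv)) = some (bi', bv') ∧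
      PySem.List.index? (pre ++ t) bv' = some bi' ∧ ∀ y ∈ pre ++ t, k bv' ≤ k y
  | [], pre, bi, bv, h1, h2 => ⟨bi, bv, rfl, by simpa using h1, by simpa using h2⟩
  | x :: t, pre, bi, bv, h1, h2 => by
    simp only [pvVF]
    by_cases h : k x < k bv
    · simp only [h, if_pos]
      have hnot : x ∉ pre := fun hx => absurd (h2 x hx) (by omega)
      have h1' : PySem.List.index? (pre ++ [x]) x = some pre.length :=
        PySem.List.index?_append_singleton_self pre x hnot
      have h2' : ∀ y ∈ pre ++ [x], k x ≤ k y := by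
        intro y hy
        rcases List.mem_append.mp hy with hy | hy
        · exact le_of_lt (lt_of_lt_of_le h (h2 y hy))
        · simp at hy; subst hy; exact le_rfl
      have := pvVF_idx k t (pre ++ [x]) pre.length x h1' h2'
      rw [List.length_append, List.length_cons, List.length_nil] at this
      simpa [List.append_assoc] using this
    · simp only [h, if_neg, not_false_iff]
      have hmem : bv ∈ pre := (PySem.List.index?_isSome_iff pre bv).mp (by rw [h1]; rfl)
      have h1' : PySem.List.index? (pre ++ [x]) bv = some bi :=
        (PySem.List.index?_append_of_mem [x] hmem).trans h1
      have h2' : ∀ y ∈ pre ++ [x], k bv ≤ k y := by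
        intro y hy
        rcases List.mem_append.mp hy with hy | hy
        · exact h2 y hy
        · simp at hy; subst hy; omega
      have := pvVF_idx k t (pre ++ [x]) bi bv h1' h2'
      rw [List.length_append, List.length_cons, List.length_nil] at this
      simpa [List.append_assoc] using this

-- the fused tracker over a nonempty list: min? is some, index? of it is some, and they match the tracker
theorem pvTrack (k : Int → Nat) (x : Int) (t : List Int) :
    ∃ bi bv, pvDF k (x :: t) 0 none = some (bi, k bv) ∧
      PySem.List.min? (x :: t) k = some bv ∧
      PySem.List.index? (x :: t) bv = some bi := by
  have h1 : PySem.List.index? [x] x = some 0 := PySem.List.index?_cons_self x []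
  have h2 : ∀ y ∈ [x], k x ≤ k y := by intro y hy; simp at hy; subst hy; exact le_rfl
  obtain ⟨bi, bv, hvf, hidx, _⟩ := pvVF_idx k t [x] 0 x h1 h2
  refine ⟨bi, bv, ?_, ?_, by simpa using hidx⟩
  · show pvDF k (x :: t) 0 none = some (bi, k bv)
    simp only [pvDF]
    rw [pvDF_eq_vF k t 1 0 x]
    have : pvVF k t 1 (some (0, x)) = some (bi, bv) := by simpa using hvf
    rw [this]; rfl
  · rw [pvMin?_cons, ← pvVF_val k t 1 0 x]
    have : pvVF k t 1 (some (0, x)) = some (bi, bv) := by simpa using hvf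
    rw [this]; rfl

theorem pvStep_eq (s e : Int) (tps : List (Int × Int)) : pvStepA s e tps = pvStepB s e tps := by
  cases tps with
  | nil => rfl
  | cons p rest =>
    obtain ⟨bs, ns, hdfS, hminS, hidxS⟩ :=
      pvTrack (fun x => (x - s).natAbs) p.1 (rest.map (·.1))
    obtain ⟨be, ne_, hdfE, hminE, hidxE⟩ :=
      pvTrack (fun x => (x - e).natAbs) p.2 (rest.map (·.2))
    have hne : pvMaxF (p.2 :: rest.map (·.2)) none ≠ none := by
      intro h
      have h' : PySem.List.max? (p.2 :: rest.map (·.2)) (fun x => x) = none := by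
        rw [pvMax?_eq]; exact h
      exact absurd ((PySem.List.max?_eq_none_iff _ _).mp h') (by simp)
    simp only [pvStepA, pvStepB, pvFuse_decomp, List.map_cons, pvMax?_eq, hdfS, hdfE]
    cases hmx : pvMaxF (p.2 :: rest.map (·.2)) none with
    | none => exact absurd hmx hne
    | some m => simp only [hminS, hminE, hidxS, hidxE]

theorem pvLoop_eq : ∀ (l : List (Int × Int × List (Int × Int))) (ss es : List Int),
    pvLoopA l ss es = pvLoopB l ss es
  | [], _, _ => rfl
  | (s, e, tps) :: rest, ss, es => by
    simp only [pvLoopA, pvLoopB, pvStep_eq s e tps]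
    cases pvStepB s e tps with
    | none => rfl
    | some p => exact pvLoop_eq rest (ss ++ [p.1]) (es ++ [p.2])

-- ===== VERDICT (by name: the statement is the Claim_ definition above) =====
theorem char_idxs_to_token_idxs_py_spec : Claim_equal_char_idxs_to_token_idxs_py := by
  intro char_idxs tokenizer_out _ _
  unfold Spec_char_idxs_to_token_idxs_py
  unfold char_idxs_to_token_idxs_py char_idxs_to_token_idxs_py_alt
  cases PySem.Dict.get? (⟨tokenizer_out⟩ : PySem.Dict String (List (List (Int × Int)))) "offset_mapping" with
  | none => rfl
  | some tp =>
    simp only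
    split
    · exact pvLoop_eq _ [] []
    · rfl
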